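-- pv_equiv track=rewrite | github.com/leobloedow/book-to-json | booktojson.py | clean_page_text
-- ===== SOURCE A (Python) =====
-- def clean_page_text(text):
--     # split text into lines
--     lines = text.splitlines()
--     cleaned = []
--     buffer = ''
--     for line in lines:
--         #removes spaces at the beginning and end
--         line = line.strip()
--         # skip empty lines
--         if not line:
--             continue
--         # skip numbers only lines (page numbers)
--         if line.isdigit():
--             continue
--         # buffer lines ending with "-"
--         if line.endswith('-'):
--             buffer += line[:-1]
--         else:
--             cleaned.append(buffer + line)
--             buffer = ''
--     # join buffer with the last line
--     if buffer:
--         cleaned.append(buffer)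
--     return ' '.join(cleaned)
-- ===== SOURCE B (Python) =====
-- def clean_page_text(text):
--     # pass 1: keep the stripped, non-empty, non-page-number lines
--     kept = [s for s in (ln.strip() for ln in text.splitlines()) if s and not s.isdigit()]
--     # pass 2: merge hyphenated fragments back-to-front into their following group
--     groups = []
--     for line in reversed(kept):
--         if not line.endswith('-'):
--             groups.append(line)
--         else:
--             frag = line[:-1]
--             if groups:
--                 groups[-1] = frag + groups[-1]
--             elif frag:
--                 groups.append(frag)
--     return ' '.join(reversed(groups))
-- ===== Notes on version B (the rewrite author's own statement) =====
-- stated objective: alternative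
-- what changed: A's single loop that interleaves filtering with buffer-based hyphen merging is replaced by two separate passes: a comprehension that keeps the stripped non-empty non-digit lines, then a back-to-front traversal that merges each hyphen fragment into its already-built following group instead of carrying a forward buffer.
import Mathlib
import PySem

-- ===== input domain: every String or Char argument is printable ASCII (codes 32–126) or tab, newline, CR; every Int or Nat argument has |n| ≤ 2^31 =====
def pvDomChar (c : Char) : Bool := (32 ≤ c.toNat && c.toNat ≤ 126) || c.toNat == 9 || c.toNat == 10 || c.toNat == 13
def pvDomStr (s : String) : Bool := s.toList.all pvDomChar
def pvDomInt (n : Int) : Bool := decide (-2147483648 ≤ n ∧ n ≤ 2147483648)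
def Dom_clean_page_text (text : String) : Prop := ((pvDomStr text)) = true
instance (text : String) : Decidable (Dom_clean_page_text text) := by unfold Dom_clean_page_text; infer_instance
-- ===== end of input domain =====

-- B re-decomposes A's single interleaved loop into two passes (a filter, then a
-- back-to-front merge of hyphen fragments into the following group); objective: alternative.

-- ===== PORT A =====
-- A's loop body: strip, skip empty/digit lines, buffer hyphenated fragments, else flush buffer+line
def pvStepRawA (st : List (List Char) × List Char) (rawLine : List Char) :
    List (List Char) × List Char :=
  let line := PySem.Chars.strip rawLine
  if line = [] then st
  else if PySem.Chars.strIsdigit line then st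
  else if PySem.Chars.endswith line ['-'] then
    (st.1, st.2 ++ PySem.Chars.slice line none (some (-1)))
  else (st.1 ++ [st.2 ++ line], [])

def clean_page_text (text : String) : String :=
  let lines := PySem.Chars.splitlines text.toList
  let st := lines.foldl pvStepRawA ([], [])
  let cleaned := if st.2 ≠ [] then st.1 ++ [st.2] else st.1
  String.ofList (PySem.Chars.join [' '] cleaned)

-- ===== PORT B =====
-- Python's `groups` is kept reversed here (Python appends at the end and edits groups[-1];
-- the port conses and edits the head), so Python's final reversed(groups) is the accumulator itself.
def pvStepB (groups : List (List Char)) (line : List Char) : List (List Char) :=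
  if ¬ PySem.Chars.endswith line ['-'] then line :: groups
  else
    let frag := PySem.Chars.slice line none (some (-1))
    match groups with
    | g :: gs => (frag ++ g) :: gs
    | [] => if frag ≠ [] then [frag] else []

def clean_page_text_alt (text : String) : String :=
  let kept := ((PySem.Chars.splitlines text.toList).map PySem.Chars.strip).filter
      (fun s => !s.isEmpty && !PySem.Chars.strIsdigit s)
  String.ofList (PySem.Chars.join [' '] (kept.reverse.foldl pvStepB []))

-- ===== PRECONDITION & SPEC =====
def Spec_clean_page_text (text : String) (out : String) : Prop := out = clean_page_text_alt text
instance (text : String) (out : String) : Decidable (Spec_clean_page_text text out) := by unfold Spec_clean_page_text; infer_instance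

-- ===== CLAIM (what is proved, stated in full; the proofs are below) =====
def Claim_equal_clean_page_text : Prop := ∀ (text : String), Dom_clean_page_text text → Spec_clean_page_text text (clean_page_text text)

-- ===== LEMMAS AND PROOFS =====

-- attach a buffer in front of the first group (empty buffer attaches to nothing)
def pvAtt (b : List Char) (g : List (List Char)) : List (List Char) :=
  match g with
  | [] => if b ≠ [] then [b] else []
  | h :: t => (b ++ h) :: t

theorem pvAtt_nil (g : List (List Char)) : pvAtt [] g = g := by
  cases g <;> simp [pvAtt]

theorem pvAtt_att (b c : List Char) (g : List (List Char)) :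
    pvAtt b (pvAtt c g) = pvAtt (b ++ c) g := by
  cases g with
  | nil =>
    by_cases hc : c = []
    · by_cases hb : b = [] <;> simp [pvAtt, hc, hb]
    · simp [pvAtt, hc]
  | cons h t => simp [pvAtt]

-- B's merge as a foldr
def pvM (L : List (List Char)) : List (List Char) :=
  L.foldr (fun x y => pvStepB y x) []

theorem pvM_eq (L : List (List Char)) : L.reverse.foldl pvStepB [] = pvM L := by
  simp [pvM, List.foldl_reverse]

theorem pvM_cons_hyphen (h : List Char) (t : List (List Char))
    (hh : PySem.Chars.endswith h ['-'] = true) :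
    pvM (h :: t) = pvAtt (PySem.Chars.slice h none (some (-1))) (pvM t) := by
  show pvStepB (pvM t) h = _
  cases pvM t <;> simp [pvStepB, pvAtt, hh]

theorem pvM_cons_plain (h : List Char) (t : List (List Char))
    (hh : ¬ PySem.Chars.endswith h ['-'] = true) :
    pvM (h :: t) = h :: pvM t := by
  show pvStepB (pvM t) h = _
  simp [pvStepB, hh]

-- A's core step, on an already-filtered line
def pvStepA (st : List (List Char) × List Char) (line : List Char) :
    List (List Char) × List Char :=
  if PySem.Chars.endswith line ['-'] then
    (st.1, st.2 ++ PySem.Chars.slice line none (some (-1)))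
  else (st.1 ++ [st.2 ++ line], [])

-- A's full loop over raw lines = core loop over the filtered stripped lines
theorem pvFilter_loop (lines : List (List Char)) (st : List (List Char) × List Char) :
    lines.foldl pvStepRawA st
    = ((lines.map PySem.Chars.strip).filter
        (fun s => !s.isEmpty && !PySem.Chars.strIsdigit s)).foldl pvStepA st := by
  induction lines generalizing st with
  | nil => rfl
  | cons r rest ih =>
    simp only [List.foldl_cons, List.map_cons, List.filter_cons]
    by_cases h1 : PySem.Chars.strip r = []
    · rw [show pvStepRawA st r = st by simp [pvStepRawA, h1]]
      rw [show (!(PySem.Chars.strip r).isEmpty && !PySem.Chars.strIsdigit (PySem.Chars.strip r)) = false by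
        simp [h1]]
      exact ih st
    · by_cases h2 : PySem.Chars.strIsdigit (PySem.Chars.strip r) = true
      · rw [show pvStepRawA st r = st by simp [pvStepRawA, h1, h2]]
        rw [show (!(PySem.Chars.strip r).isEmpty && !PySem.Chars.strIsdigit (PySem.Chars.strip r)) = false by
          simp [h2]]
        exact ih st
      · rw [show pvStepRawA st r = pvStepA st (PySem.Chars.strip r) by
          simp [pvStepRawA, pvStepA, h1, h2]]
        rw [show (!(PySem.Chars.strip r).isEmpty && !PySem.Chars.strIsdigit (PySem.Chars.strip r)) = true by
          simp [h1, h2]]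
        exact ih (pvStepA st (PySem.Chars.strip r))

-- main invariant: A's flushed result = prefix ++ buffer attached to B's merge
theorem pvMain (L : List (List Char)) (c : List (List Char)) (b : List Char) :
    (if (L.foldl pvStepA (c, b)).2 ≠ [] then
      (L.foldl pvStepA (c, b)).1 ++ [(L.foldl pvStepA (c, b)).2]
     else (L.foldl pvStepA (c, b)).1) = c ++ pvAtt b (pvM L) := by
  induction L generalizing c b with
  | nil =>
    by_cases hb : b = [] <;> simp [pvM, pvAtt, hb]
  | cons h t ih =>
    simp only [List.foldl_cons]
    by_cases hh : PySem.Chars.endswith h ['-'] = true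
    · rw [show pvStepA (c, b) h = (c, b ++ PySem.Chars.slice h none (some (-1))) by
        simp [pvStepA, hh]]
      rw [ih, pvM_cons_hyphen _ _ hh, pvAtt_att]
    · rw [show pvStepA (c, b) h = (c ++ [b ++ h], []) by simp [pvStepA, hh]]
      rw [ih, pvAtt_nil, pvM_cons_plain _ _ hh]
      simp [pvAtt]

-- ===== VERDICT (by name: the statement is the Claim_ definition above) =====
theorem clean_page_text_spec : Claim_equal_clean_page_text := by
  intro text _
  show clean_page_text text = clean_page_text_alt text
  simp only [clean_page_text, clean_page_text_alt]
  rw [pvFilter_loop, pvM_eq, pvMain, pvAtt_nil, List.nil_append]
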